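-- pv_equiv track=rewrite | github.com/chuoer47/AlgorithmLearning | leetcode周赛/第 459 场周赛/统计梯形的数目 II.py | count_parallelograms
-- ===== SOURCE A (Python) =====
-- from collections import defaultdict
-- from math import gcd
-- from collections import defaultdict
-- from math import gcd
--
-- def count_parallelograms(nums):
--     """
--     计算给定点数组中能构成的平行四边形数目，排除共线点形成的无效情况。
--
--     参数:
--     nums (list): 点的数组，每个点表示为 [x, y]
--
--     返回:
--     int: 有效平行四边形的数量
--     """
--     n = len(nums)
--     if n < 4:
--         return 0
--
--     # 存储每个中点对应的边，按斜率分组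
--     midpoint_slopes = defaultdict(lambda: defaultdict(int))
--
--     # 计算所有点对的中点和斜率
--     for i in range(n):
--         x1, y1 = nums[i]
--         for j in range(i + 1, n):
--             x2, y2 = nums[j]
--
--             # 计算中点 (乘以2避免浮点数)
--             mid_x = x1 + x2
--             mid_y = y1 + y2
--             midpoint = (mid_x, mid_y)
--
--             # 计算斜率 dy/dx，标准化为最简分数
--             dx = x2 - x1
--             dy = y2 - y1
--
--             if dx == 0:
--                 # 垂直线，斜率为无穷大，用 (0, 1) 表示
--                 slope = (0, 1)
--             else:
--                 # 计算最简分数形式的斜率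
--                 g = gcd(abs(dy), abs(dx))
--                 numerator = dy // g
--                 denominator = dx // g
--
--                 # 确保分母为正，统一方向
--                 if denominator < 0:
--                     numerator = -numerator
--                     denominator = -denominator
--
--                 slope = (numerator, denominator)
--
--             # 更新对应中点和斜率的边计数
--             midpoint_slopes[midpoint][slope] += 1
--
--     # 计算平行四边形数目
--     total = 0
--
--     for midpoint in midpoint_slopes:
--         slopes = midpoint_slopes[midpoint]
--         edges = list(slopes.values())
--         sum_edges = sum(edges)
--
--         # 所有可能的边对数目
--         total_pairs = sum_edges * (sum_edges - 1) // 2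
--
--         # 减去共线的边对数目
--         collinear_pairs = sum(e * (e - 1) // 2 for e in edges)
--
--         # 有效平行四边形数目
--         valid_pairs = total_pairs - collinear_pairs
--         total += valid_pairs
--
--     return total
-- ===== SOURCE B (Python) =====
-- from math import gcd
--
-- def _key(p, q):
--     x1, y1 = p
--     x2, y2 = q
--     dx = x2 - x1
--     dy = y2 - y1
--     if dx == 0:
--         slope = (0, 1)
--     else:
--         g = gcd(abs(dy), abs(dx))
--         num = dy // g
--         den = dx // g
--         if den < 0:
--             num, den = -num, -den
--         slope = (num, den)
--     return (x1 + x2, y1 + y2), slope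
--
-- def count_parallelograms(nums):
--     n = len(nums)
--     if n < 4:
--         return 0
--     mid_total = {}
--     slope_count = {}
--     total = 0
--     for i in range(n):
--         for j in range(i + 1, n):
--             m, s = _key(nums[i], nums[j])
--             total += mid_total.get(m, 0) - slope_count.get((m, s), 0)
--             mid_total[m] = mid_total.get(m, 0) + 1
--             slope_count[(m, s)] = slope_count.get((m, s), 0) + 1
--     return total
-- ===== Notes on version B (the rewrite author's own statement) =====
-- stated objective: alternative
-- what changed: B replaces A's nested defaultdict of per-(midpoint,slope) counts plus a second aggregation pass computing C(S,2)-sum C(e,2) per midpoint by a single incremental pass: two flat counters (segments per midpoint, segments per (midpoint,slope)) and a running total that adds mid_total[m]-slope_count[(m,s)] for each new segment, returning the total directly with no second pass.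
import Mathlib
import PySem

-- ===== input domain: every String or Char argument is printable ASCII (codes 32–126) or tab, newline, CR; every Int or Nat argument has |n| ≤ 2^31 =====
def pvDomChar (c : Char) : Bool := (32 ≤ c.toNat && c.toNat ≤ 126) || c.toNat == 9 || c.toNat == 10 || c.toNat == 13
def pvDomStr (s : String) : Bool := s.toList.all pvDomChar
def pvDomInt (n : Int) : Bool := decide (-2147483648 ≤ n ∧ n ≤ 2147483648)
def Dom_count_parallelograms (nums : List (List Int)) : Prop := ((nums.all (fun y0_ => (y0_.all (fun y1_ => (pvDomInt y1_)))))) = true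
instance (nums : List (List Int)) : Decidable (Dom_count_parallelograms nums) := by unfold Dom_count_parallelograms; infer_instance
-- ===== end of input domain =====

-- B replaces A's nested defaultdict plus second combinatorial aggregation pass by a single
-- incremental pass over the same point pairs with two flat counters and a running total
-- (objective: alternative decomposition, same O(n^2) cost).

-- ===== PORT A =====
-- Python's 'x1, y1 = p' for a 2-element list (both A and B unpack like this);
-- the fallback is unreachable under Pre_ (Python raises ValueError there).
def pvPair (p : List Int) : Int × Int :=
  match p with
  | [x, y] => (x, y)
  | _ => (0, 0)

def count_parallelograms (nums : List (List Int)) : Int :=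
  let n := nums.length
  if n < 4 then 0
  else
    let midpointSlopes : PySem.Dict (Int × Int) (PySem.Dict (Int × Int) Int) :=
      (List.range n).foldl (fun d i =>
        let p1 := pvPair (nums.getD i [])
        (List.range' (i + 1) (n - (i + 1))).foldl (fun d j =>
          let p2 := pvPair (nums.getD j [])
          let midpoint := (p1.1 + p2.1, p1.2 + p2.2)
          let dx := p2.1 - p1.1
          let dy := p2.2 - p1.2
          let slope : Int × Int :=
            if dx = 0 then (0, 1)
            else
              let g : Int := (Int.gcd dy dx : Int)
              let numerator := PySem.Int.floordiv dy g
              let denominator := PySem.Int.floordiv dx g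
              if denominator < 0 then (-numerator, -denominator)
              else (numerator, denominator)
          d.modify midpoint PySem.Dict.empty (fun inner => inner.modify slope 0 (· + 1))) d)
        PySem.Dict.empty
    midpointSlopes.keys.foldl (fun total midpoint =>
      let slopes := midpointSlopes.getD midpoint PySem.Dict.empty
      let edges := slopes.values
      let sumEdges := edges.sum
      let totalPairs := PySem.Int.floordiv (sumEdges * (sumEdges - 1)) 2
      let collinearPairs := edges.foldl (fun acc e => acc + PySem.Int.floordiv (e * (e - 1)) 2) 0
      total + (totalPairs - collinearPairs)) 0

-- ===== PORT B =====
-- B's helper _key(p, q): midpoint key and normalized slope of the segment p-q.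
def pvKey (p q : List Int) : (Int × Int) × (Int × Int) :=
  let p1 := pvPair p
  let p2 := pvPair q
  let dx := p2.1 - p1.1
  let dy := p2.2 - p1.2
  let slope : Int × Int :=
    if dx = 0 then (0, 1)
    else
      let g : Int := (Int.gcd dy dx : Int)
      let num := PySem.Int.floordiv dy g
      let den := PySem.Int.floordiv dx g
      if den < 0 then (-num, -den) else (num, den)
  ((p1.1 + p2.1, p1.2 + p2.2), slope)

def count_parallelograms_alt (nums : List (List Int)) : Int :=
  let n := nums.length
  if n < 4 then 0
  else
    let st :=
      (List.range n).foldl (fun st i =>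
        (List.range' (i + 1) (n - (i + 1))).foldl (fun st j =>
          let ms := pvKey (nums.getD i []) (nums.getD j [])
          (st.1 + (st.2.1.getD ms.1 0 - st.2.2.getD ms 0),
           st.2.1.insert ms.1 (st.2.1.getD ms.1 0 + 1),
           st.2.2.insert ms (st.2.2.getD ms 0 + 1))) st)
        ((0 : Int), (PySem.Dict.empty : PySem.Dict (Int × Int) Int),
         (PySem.Dict.empty : PySem.Dict ((Int × Int) × (Int × Int)) Int))
    st.1

-- ===== PRECONDITION & SPEC =====
-- Pre_ excludes exactly the inputs where Python A raises ValueError: 4 or more points,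
-- one of which is not a 2-element list (Python's 'x1, y1 = nums[i]' unpacking fails there).
def Pre_count_parallelograms (nums : List (List Int)) : Prop :=
  nums.length < 4 ∨ ∀ p ∈ nums, p.length = 2
instance (nums : List (List Int)) : Decidable (Pre_count_parallelograms nums) := by
  unfold Pre_count_parallelograms; infer_instance

def pvWitness_count_parallelograms : List (List Int) := [[0, 0], [2, 0], [0, 2], [2, 2]]

def Spec_count_parallelograms (nums : List (List Int)) (out : Int) : Prop :=
  out = count_parallelograms_alt nums
instance (nums : List (List Int)) (out : Int) : Decidable (Spec_count_parallelograms nums out) := by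
  unfold Spec_count_parallelograms; infer_instance

-- ===== CLAIM (what is proved, stated in full; the proofs are below) =====
def Claim_equal_count_parallelograms : Prop := ∀ (nums : List (List Int)), Dom_count_parallelograms nums → Pre_count_parallelograms nums → Spec_count_parallelograms nums (count_parallelograms nums)

-- ===== LEMMAS AND PROOFS =====

-- Proof-side abstractions ------------------------------------------------------

-- one A-loop step on the nested dict, as a function of the pair's key
def pvStepA (d : PySem.Dict (Int × Int) (PySem.Dict (Int × Int) Int))
    (k : (Int × Int) × (Int × Int)) : PySem.Dict (Int × Int) (PySem.Dict (Int × Int) Int) :=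
  d.modify k.1 PySem.Dict.empty (fun inner => inner.modify k.2 0 (· + 1))

-- one B-loop step on the (total, mid_total, slope_count) state
def pvStepB (st : Int × PySem.Dict (Int × Int) Int × PySem.Dict ((Int × Int) × (Int × Int)) Int)
    (k : (Int × Int) × (Int × Int)) :
    Int × PySem.Dict (Int × Int) Int × PySem.Dict ((Int × Int) × (Int × Int)) Int :=
  (st.1 + (st.2.1.getD k.1 0 - st.2.2.getD k 0),
   st.2.1.insert k.1 (st.2.1.getD k.1 0 + 1),
   st.2.2.insert k (st.2.2.getD k 0 + 1))

-- the (midpoint, slope) keys of all point pairs, in loop order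
def pvKeys (nums : List (List Int)) : List ((Int × Int) × (Int × Int)) :=
  (List.range nums.length).flatMap (fun i =>
    (List.range' (i + 1) (nums.length - (i + 1))).map
      (fun j => pvKey (nums.getD i []) (nums.getD j [])))

-- A's per-midpoint value from the list of edge counts
def pvValF (vs : List Int) : Int :=
  PySem.Int.floordiv (vs.sum * (vs.sum - 1)) 2
    - vs.foldl (fun acc e => acc + PySem.Int.floordiv (e * (e - 1)) 2) 0

-- multiset of multiplicities of a list (counter values)
def pvCnt (l : List ((Int × Int))) : List Int :=
  (PySem.Set.ofList l).map (fun x => (l.count x : Int))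

def pvW (l : List (Int × Int)) : Int := pvValF (pvCnt l)

def pvSlopesAt (ks : List ((Int × Int) × (Int × Int))) (m : Int × Int) : List (Int × Int) :=
  (ks.filter (fun k => k.1 == m)).map Prod.snd

def pvAgg (d : PySem.Dict (Int × Int) (PySem.Dict (Int × Int) Int)) : Int :=
  (d.keys.map (fun m => pvValF (d.getD m PySem.Dict.empty).values)).sum

def pvG (ks : List ((Int × Int) × (Int × Int))) : Int :=
  ((PySem.Set.ofList (ks.map Prod.fst)).map (fun m => pvW (pvSlopesAt ks m))).sum

-- Structural lemmas: the two ports are the corresponding folds over pvKeys ------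

lemma pvPortA_eq (nums : List (List Int)) :
    count_parallelograms nums =
      if nums.length < 4 then 0 else pvAgg ((pvKeys nums).foldl pvStepA PySem.Dict.empty) := by
  by_cases h : nums.length < 4
  · simp [count_parallelograms, h]
  · simp only [count_parallelograms, pvAgg, pvKeys, if_neg h]
    rw [List.foldl_flatMap]
    simp only [List.foldl_map]
    rw [PySem.List.foldl_add]
    simp only [pvValF, pvStepA, pvKey, zero_add]

lemma pvPortB_eq (nums : List (List Int)) :
    count_parallelograms_alt nums =
      if nums.length < 4 then 0
      else ((pvKeys nums).foldl pvStepB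
        ((0 : Int), PySem.Dict.empty, PySem.Dict.empty)).1 := by
  by_cases h : nums.length < 4
  · simp [count_parallelograms_alt, h]
  · simp only [count_parallelograms_alt, pvKeys, if_neg h]
    rw [List.foldl_flatMap]
    simp only [List.foldl_map]
    rfl

-- Arithmetic: triangular-number step -------------------------------------------

lemma pvTri (e : Int) :
    PySem.Int.floordiv ((e + 1) * e) 2 = PySem.Int.floordiv (e * (e - 1)) 2 + e := by
  rw [PySem.Int.floordiv_eq_ediv_of_pos (by norm_num),
      PySem.Int.floordiv_eq_ediv_of_pos (by norm_num)]
  have h : (e + 1) * e = e * (e - 1) + e * 2 := by ring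
  rw [h, Int.add_mul_ediv_right _ _ (by norm_num)]

lemma pvValF_eq (vs : List Int) :
    pvValF vs = PySem.Int.floordiv (vs.sum * (vs.sum - 1)) 2
      - (vs.map (fun e => PySem.Int.floordiv (e * (e - 1)) 2)).sum := by
  unfold pvValF
  rw [PySem.List.foldl_add]
  ring

-- Counting lemmas ---------------------------------------------------------------

lemma pvCnt_sum (l : List (Int × Int)) : (pvCnt l).sum = (l.length : Int) := by
  unfold pvCnt
  have hperm : (PySem.Set.ofList l).Perm l.dedup :=
    (List.perm_ext_iff_of_nodup (PySem.Set.nodup_ofList l) l.nodup_dedup).2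
      (fun a => by simp [PySem.Set.mem_ofList, List.mem_dedup])
  rw [List.Perm.sum_eq (hperm.map _)]
  have hcc : ∀ x : Int × Int,
      (l.count x : Nat) = (@List.count _ instBEqOfDecidableEq x l : Nat) := by
    intro x
    simp only [List.count]
    exact List.countP_congr (fun a _ => by by_cases hax : a = x <;> simp [hax])
  have h1 : l.dedup.map (fun x => ((l.count x : Nat) : Int)) =
      l.dedup.map (fun x => ((@List.count _ instBEqOfDecidableEq x l : Nat) : Int)) :=
    List.map_congr_left (fun x _ => by rw [hcc x])
  rw [h1]
  have h2 : ((l.dedup.map fun x => @List.count _ instBEqOfDecidableEq x l).sum : Int) =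
      (l.length : Int) := by
    exact_mod_cast congrArg (fun n : Nat => (n : Int)) (List.sum_map_count_dedup_eq_length l)
  rw [← h2, Nat.cast_list_sum, List.map_map]
  rfl

lemma pvSum_map_congr_except {α : Type} [DecidableEq α] (D : List α) (hD : D.Nodup)
    (f g : α → Int) (s : α) (hs : s ∈ D) (h : ∀ x ∈ D, x ≠ s → f x = g x) :
    (D.map f).sum = (D.map g).sum + (f s - g s) := by
  induction D with
  | nil => cases hs
  | cons a D ih =>
    rcases List.mem_cons.1 hs with rfl | hsD
    · have hnot : s ∉ D := (List.nodup_cons.1 hD).1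
      have : D.map f = D.map g :=
        List.map_congr_left (fun x hx => h x (List.mem_cons_of_mem _ hx)
          (fun hxs => hnot (hxs ▸ hx)))
      simp only [List.map_cons, List.sum_cons, this]
      ring
    · have hne : a ≠ s := fun hh => (List.nodup_cons.1 hD).1 (hh ▸ hsD)
      have hfa : f a = g a := h a List.mem_cons_self hne
      have := ih (List.nodup_cons.1 hD).2 hsD
        (fun x hx => h x (List.mem_cons_of_mem _ hx))
      simp only [List.map_cons, List.sum_cons, hfa, this]
      ring

lemma pvValF_append_one (vs : List Int) : pvValF (vs ++ [1]) = pvValF vs + vs.sum := by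
  rw [pvValF_eq, pvValF_eq, List.sum_append, List.map_append, List.sum_append]
  have h1 : ([(1 : Int)]).sum = 1 := by decide
  have h2 : (([(1 : Int)]).map (fun e => PySem.Int.floordiv (e * (e - 1)) 2)).sum = 0 := by decide
  rw [h1, h2]
  have h3 : (vs.sum + 1) * (vs.sum + 1 - 1) = (vs.sum + 1) * vs.sum := by ring
  rw [h3, pvTri]
  ring

-- counter-values delta: appending one element to the grouped list
lemma pvW_append (l : List (Int × Int)) (s : Int × Int) :
    pvW (l ++ [s]) = pvW l + (l.length : Int) - (l.count s : Int) := by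
  by_cases hs : s ∈ l
  · -- s already present: only its multiplicity bumps
    have hof : PySem.Set.ofList (l ++ [s]) = PySem.Set.ofList l := by
      rw [PySem.Set.ofList_append_singleton,
        PySem.Set.add_of_mem ((PySem.Set.mem_ofList _ _).2 hs)]
    have hD := PySem.Set.nodup_ofList (α := Int × Int) l
    have hmem : s ∈ PySem.Set.ofList l := (PySem.Set.mem_ofList _ _).2 hs
    have hcnt : ∀ x ∈ PySem.Set.ofList l, x ≠ s →
        (((l ++ [s]).count x : Int)) = ((l.count x : Int)) := by
      intro x _ hxs
      simp [List.count_append, Ne.symm hxs]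
    have hsum : (pvCnt (l ++ [s])).sum = (pvCnt l).sum + 1 := by
      unfold pvCnt
      rw [hof, pvSum_map_congr_except (PySem.Set.ofList l) hD
        (fun x => (((l ++ [s]).count x : Nat) : Int)) (fun x => ((l.count x : Nat) : Int))
        s hmem hcnt]
      simp [List.count_append]
    have hsq : ((pvCnt (l ++ [s])).map (fun e => PySem.Int.floordiv (e * (e - 1)) 2)).sum =
        ((pvCnt l).map (fun e => PySem.Int.floordiv (e * (e - 1)) 2)).sum + (l.count s : Int) := by
      unfold pvCnt
      rw [hof, List.map_map, List.map_map]
      rw [pvSum_map_congr_except (PySem.Set.ofList l) hD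
        ((fun e => PySem.Int.floordiv (e * (e - 1)) 2) ∘ fun x => (((l ++ [s]).count x : Nat) : Int))
        ((fun e => PySem.Int.floordiv (e * (e - 1)) 2) ∘ fun x => ((l.count x : Nat) : Int))
        s hmem (fun x hx hxs => by
          simp only [Function.comp_apply]
          rw [hcnt x hx hxs])]
      have hbump : ((l ++ [s]).count s : Int) = (l.count s : Int) + 1 := by
        simp [List.count_append]
      simp only [Function.comp_apply, hbump]
      have h1 : ((l.count s : Int) + 1) * ((l.count s : Int) + 1 - 1) =
          ((l.count s : Int) + 1) * (l.count s : Int) := by ring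
      rw [h1, pvTri]
      ring
    have hS : (pvCnt l).sum = (l.length : Int) := pvCnt_sum l
    rw [pvW, pvW, pvValF_eq, pvValF_eq, hsum, hsq, hS]
    have harith : ((l.length : Int) + 1) * ((l.length : Int) + 1 - 1) =
        ((l.length : Int) + 1) * (l.length : Int) := by ring
    rw [harith, pvTri]
    ring
  · -- s is new: one fresh multiplicity-1 entry
    have hof : PySem.Set.ofList (l ++ [s]) = PySem.Set.ofList l ++ [s] := by
      rw [PySem.Set.ofList_append_singleton,
        PySem.Set.add_of_not_mem (fun hm => hs ((PySem.Set.mem_ofList _ _).1 hm))]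
    have hcs : l.count s = 0 := List.count_eq_zero.2 hs
    have hcnt : pvCnt (l ++ [s]) = pvCnt l ++ [1] := by
      unfold pvCnt
      rw [hof, List.map_append]
      congr 1
      · exact List.map_congr_left (fun x hx => by
          have hxs : x ≠ s := fun hh => hs (hh ▸ (PySem.Set.mem_ofList _ _).1 hx)
          simp [List.count_append, Ne.symm hxs])
      · simp [List.count_append, hcs]
    rw [pvW, pvW, hcnt, pvValF_append_one, pvCnt_sum, hcs]
    simp

lemma pvSlopesAt_append (ks : List ((Int × Int) × (Int × Int))) (k : (Int × Int) × (Int × Int))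
    (m : Int × Int) :
    pvSlopesAt (ks ++ [k]) m = pvSlopesAt ks m ++ if k.1 = m then [k.2] else [] := by
  unfold pvSlopesAt
  rw [List.filter_append, List.map_append]
  congr 1
  by_cases h : k.1 = m <;> simp [h]

lemma pvSlopesAt_length (ks : List ((Int × Int) × (Int × Int))) (m : Int × Int) :
    (pvSlopesAt ks m).length = (ks.map Prod.fst).count m := by
  induction ks with
  | nil => rfl
  | cons k ks ih =>
    by_cases h : k.1 = m <;>
      simp [pvSlopesAt, h] at * <;> omega

lemma pvSlopesAt_count (ks : List ((Int × Int) × (Int × Int))) (k : (Int × Int) × (Int × Int)) :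
    (pvSlopesAt ks k.1).count k.2 = ks.count k := by
  obtain ⟨m, s⟩ := k
  induction ks with
  | nil => rfl
  | cons x ks ih =>
    obtain ⟨a, b⟩ := x
    by_cases h : a = m
    · subst h
      by_cases h2 : b = s <;>
        simp [pvSlopesAt, h2, Prod.ext_iff] at * <;> omega
    · have : ((a, b) : (Int × Int) × (Int × Int)) ≠ (m, s) := by simp [Prod.ext_iff, h]
      simp [pvSlopesAt, h, this] at *
      exact ih

-- G delta: one more pair ---------------------------------------------------------

lemma pvG_append (ks : List ((Int × Int) × (Int × Int))) (k : (Int × Int) × (Int × Int)) :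
    pvG (ks ++ [k]) = pvG ks + ((ks.map Prod.fst).count k.1 : Int) - (ks.count k : Int) := by
  unfold pvG
  rw [List.map_append]
  simp only [List.map_cons, List.map_nil]
  rw [PySem.Set.ofList_append_singleton]
  by_cases hm : k.1 ∈ ks.map Prod.fst
  · rw [PySem.Set.add_of_mem ((PySem.Set.mem_ofList _ _).2 hm)]
    have hcongr : ∀ m' ∈ PySem.Set.ofList (ks.map Prod.fst), m' ≠ k.1 →
        pvW (pvSlopesAt (ks ++ [k]) m') = pvW (pvSlopesAt ks m') := by
      intro m' _ hne
      rw [pvSlopesAt_append, if_neg (fun hh => hne hh.symm), List.append_nil]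
    rw [pvSum_map_congr_except (PySem.Set.ofList (ks.map Prod.fst)) (PySem.Set.nodup_ofList _)
      (fun m' => pvW (pvSlopesAt (ks ++ [k]) m')) (fun m' => pvW (pvSlopesAt ks m')) k.1
      ((PySem.Set.mem_ofList _ _).2 hm) hcongr]
    rw [pvSlopesAt_append, if_pos rfl, pvW_append, pvSlopesAt_length, pvSlopesAt_count]
    ring
  · rw [PySem.Set.add_of_not_mem (fun hh => hm ((PySem.Set.mem_ofList _ _).1 hh)),
      List.map_append]
    simp only [List.map_cons, List.map_nil]
    have hnil : pvSlopesAt ks k.1 = [] := by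
      unfold pvSlopesAt
      rw [List.filter_eq_nil_iff.2, List.map_nil]
      intro x hx
      simp only [beq_iff_eq]
      exact fun hh => hm (List.mem_map.2 ⟨x, hx, hh⟩)
    have hold : (PySem.Set.ofList (ks.map Prod.fst)).map (fun m => pvW (pvSlopesAt (ks ++ [k]) m)) =
        (PySem.Set.ofList (ks.map Prod.fst)).map (fun m => pvW (pvSlopesAt ks m)) := by
      refine List.map_congr_left (fun m' hm' => ?_)
      have hne : k.1 ≠ m' := fun hh => hm (hh ▸ (PySem.Set.mem_ofList _ _).1 hm')
      rw [pvSlopesAt_append, if_neg hne, List.append_nil]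
    have hnew : pvW (pvSlopesAt (ks ++ [k]) k.1) = 0 := by
      rw [pvSlopesAt_append, if_pos rfl, hnil, List.nil_append]
      have hof1 : PySem.Set.ofList [k.2] = [k.2] := rfl
      have hpc : pvCnt [k.2] = [1] := by
        unfold pvCnt
        rw [hof1]
        simp
      rw [pvW, hpc]
      decide
    have hc0 : ks.count k = 0 :=
      List.count_eq_zero.2 (fun hh => hm (List.mem_map.2 ⟨k, hh, rfl⟩))
    have hc1 : (ks.map Prod.fst).count k.1 = 0 := List.count_eq_zero.2 hm
    rw [List.sum_append, hold, hnew, hc0, hc1]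
    simp

-- A's aggregation over the built nested dict equals G ---------------------------

lemma pvNested_getD (ks : List ((Int × Int) × (Int × Int)))
    (d : PySem.Dict (Int × Int) (PySem.Dict (Int × Int) Int)) (m : Int × Int) :
    (ks.foldl pvStepA d).getD m PySem.Dict.empty =
      (pvSlopesAt ks m).foldl (fun inner s => inner.modify s 0 (· + 1))
        (d.getD m PySem.Dict.empty) := by
  induction ks generalizing d with
  | nil => rfl
  | cons x ks ih =>
    rw [List.foldl_cons, ih]
    by_cases h : x.1 = m
    · have hstep : (pvStepA d x).getD m PySem.Dict.empty =
          (d.getD m PySem.Dict.empty).modify x.2 0 (· + 1) := by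
        rw [pvStepA, ← h, PySem.Dict.getD_modify_self]
      rw [hstep]
      have : pvSlopesAt (x :: ks) m = x.2 :: pvSlopesAt ks m := by
        simp [pvSlopesAt, h]
      rw [this, List.foldl_cons]
    · have hstep : (pvStepA d x).getD m PySem.Dict.empty = d.getD m PySem.Dict.empty := by
        rw [pvStepA, PySem.Dict.getD_modify_of_ne _ _ _ (fun hh => h hh.symm)]
      have : pvSlopesAt (x :: ks) m = pvSlopesAt ks m := by
        simp [pvSlopesAt, h]
      rw [hstep, this]

lemma pvAgg_eq_G (ks : List ((Int × Int) × (Int × Int))) :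
    pvAgg (ks.foldl pvStepA PySem.Dict.empty) = pvG ks := by
  unfold pvAgg pvG
  have hkeys : (ks.foldl pvStepA PySem.Dict.empty).keys = PySem.Set.ofList (ks.map Prod.fst) := by
    unfold pvStepA
    have h := PySem.Dict.keys_foldl_modify_key (ν := PySem.Dict (Int × Int) Int) ks Prod.fst
      PySem.Dict.empty (fun _ x => fun inner => inner.modify x.2 (0 : Int) (· + 1))
      PySem.Dict.empty
    simpa [PySem.Dict.keys_empty, PySem.Set.update_nil_left] using h
  rw [hkeys]
  refine congrArg List.sum (List.map_congr_left (fun m _ => ?_))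
  have hinner : (ks.foldl pvStepA PySem.Dict.empty).getD m PySem.Dict.empty =
      PySem.Dict.counter (pvSlopesAt ks m) := by
    rw [pvNested_getD, PySem.Dict.getD_empty, PySem.Dict.counter_eq_foldl]
  rw [hinner]
  have hvals : (PySem.Dict.counter (pvSlopesAt ks m)).values = pvCnt (pvSlopesAt ks m) := by
    show ((PySem.Dict.counter (pvSlopesAt ks m)).items.map Prod.snd) = _
    rw [PySem.Dict.items_counter, List.map_map]
    rfl
  rw [hvals]
  rfl

-- B's running total equals G ----------------------------------------------------

lemma pvB_mt (ks : List ((Int × Int) × (Int × Int)))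
    (st : Int × PySem.Dict (Int × Int) Int × PySem.Dict ((Int × Int) × (Int × Int)) Int) :
    (ks.foldl pvStepB st).2.1 =
      (ks.map Prod.fst).foldl (fun d m => d.insert m (d.getD m 0 + 1)) st.2.1 := by
  induction ks generalizing st with
  | nil => rfl
  | cons k ks ih => simp [pvStepB, ih]

lemma pvB_sc (ks : List ((Int × Int) × (Int × Int)))
    (st : Int × PySem.Dict (Int × Int) Int × PySem.Dict ((Int × Int) × (Int × Int)) Int) :
    (ks.foldl pvStepB st).2.2 =
      ks.foldl (fun d k => d.insert k (d.getD k 0 + 1)) st.2.2 := by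
  induction ks generalizing st with
  | nil => rfl
  | cons k ks ih => simp [pvStepB, ih]

lemma pvB_total (ks : List ((Int × Int) × (Int × Int))) :
    (ks.foldl pvStepB ((0 : Int), PySem.Dict.empty, PySem.Dict.empty)).1 = pvG ks := by
  induction ks using List.reverseRecOn with
  | nil => rfl
  | append_singleton ks k ih =>
    rw [List.foldl_append, List.foldl_cons, List.foldl_nil]
    show (ks.foldl pvStepB _).1 + ((ks.foldl pvStepB _).2.1.getD k.1 0
        - (ks.foldl pvStepB _).2.2.getD k 0) = _
    rw [pvB_mt, pvB_sc, PySem.Dict.getD_foldl_insert_add_one,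
      PySem.Dict.getD_foldl_insert_add_one, ih, pvG_append]
    simp [PySem.Dict.getD_empty]
    ring

-- ===== VERDICT (by name: the statement is the Claim_ definition above) =====
theorem count_parallelograms_spec : Claim_equal_count_parallelograms := by
  intro nums _ _
  unfold Spec_count_parallelograms
  rw [pvPortA_eq, pvPortB_eq]
  split
  · rfl
  · rw [pvB_total, pvAgg_eq_G]
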